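-- pv_equiv track=rewrite | github.com/snhansen/adventofcode | 2015/day11/solution.py | req3
-- ===== SOURCE A (Python) =====
-- def req3(s):
--     c = 0
--     i = 0
--     l = []
--     while i<len(s)-1:
--         if s[i] == s[i+1]:
--             if s[i] not in l:
--                 c += 1
--                 l.append(s[i])
--             i += 2
--             if c == 2:
--                 return True
--         else:
--             i += 1
--     return False
-- ===== SOURCE B (Python) =====
-- def req3(s):
--     doubles = set()
--     for i in range(len(s) - 1):
--         if s[i] == s[i+1]:
--             doubles.add(s[i])
--     return len(doubles) >= 2
-- ===== Notes on version B (the rewrite author's own statement) =====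
-- stated objective: simpler
-- what changed: Replaced A's greedy skip-by-2 scan with an early-exit counter and distinct-letter list by a single uniform pass that collects the set of letters occurring as an adjacent double and compares its size with 2.
import Mathlib
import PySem

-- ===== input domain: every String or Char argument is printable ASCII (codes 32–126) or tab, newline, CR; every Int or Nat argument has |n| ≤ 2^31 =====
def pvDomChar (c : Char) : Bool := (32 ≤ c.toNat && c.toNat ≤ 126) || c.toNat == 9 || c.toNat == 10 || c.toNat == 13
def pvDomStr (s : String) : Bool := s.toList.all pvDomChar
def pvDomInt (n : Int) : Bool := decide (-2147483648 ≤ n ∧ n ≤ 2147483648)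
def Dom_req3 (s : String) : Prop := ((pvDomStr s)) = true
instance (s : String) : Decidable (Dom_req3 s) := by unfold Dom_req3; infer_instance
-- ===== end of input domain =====

-- B replaces A's greedy skip-by-2 scan/early-exit counter by one uniform pass
-- collecting the set of doubled letters and a size comparison (objective: simpler).

-- ===== PORT A =====
-- A's while-loop over the index i, transcribed as recursion on the remaining
-- characters: 'i < len(s)-1' = at least two characters remain; 'i += 2' drops
-- two, 'i += 1' drops one; c and l are the same counter and distinct-letter list.
def req3Go (cs : List Char) (c : Int) (l : List Char) : Bool :=
  match cs with
  | a :: b :: rest =>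
      if a = b then
        let (c', l') := if a ∈ l then (c, l) else (c + 1, l ++ [a])
        if c' = 2 then true else req3Go rest c' l'
      else req3Go (b :: rest) c l
  | _ => false
termination_by cs.length

def req3 (s : String) : Bool := req3Go s.toList 0 []

-- ===== PORT B =====
-- B's for-loop over adjacent positions, adding doubled letters to a set.
def dblGo (cs : List Char) (acc : PySem.Set Char) : PySem.Set Char :=
  match cs with
  | a :: b :: rest => dblGo (b :: rest) (if a = b then PySem.Set.add acc a else acc)
  | _ => acc
termination_by cs.length

def req3_alt (s : String) : Bool := decide (2 ≤ (dblGo s.toList PySem.Set.empty).length)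

-- ===== PRECONDITION & SPEC =====
def Spec_req3 (s : String) (out : Bool) : Prop := out = req3_alt s
instance (s : String) (out : Bool) : Decidable (Spec_req3 s out) := by unfold Spec_req3; infer_instance

-- ===== CLAIM (what is proved, stated in full; the proofs are below) =====
def Claim_equal_req3 : Prop := ∀ (s : String), Dom_req3 s → Spec_req3 s (req3 s)

-- ===== LEMMAS AND PROOFS =====

-- dblGo only extends its accumulator by appending elements.
theorem dblGo_length_mono (cs : List Char) (acc : List Char) :
    acc.length ≤ (dblGo cs acc).length := by
  induction cs generalizing acc with
  | nil => simp [dblGo]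
  | cons a t ih =>
      match t with
      | [] => simp [dblGo]
      | b :: rest =>
          rw [dblGo]
          refine le_trans ?_ (ih _)
          split
          · simp [PySem.Set.add]; split <;> simp
          · exact le_rfl

-- Skipping a leading character already in the accumulator does not change the set.
theorem dblGo_cons_mem (a : Char) (rest : List Char) (acc : List Char) (ha : a ∈ acc) :
    dblGo (a :: rest) acc = dblGo rest acc := by
  match rest with
  | [] => simp [dblGo]
  | b :: rs =>
      rw [dblGo]
      congr 1
      split
      · next h => subst h; simp [PySem.Set.add, ha]
      · rfl

-- Main invariant: with the counter equal to the list's length (< 2), A's loop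
-- answers exactly whether B's doubled-letter set reaches size 2.
theorem req3Go_eq (cs : List Char) (l : List Char) (hl : l.length < 2) :
    req3Go cs (l.length : Int) l = decide (2 ≤ (dblGo cs l).length) := by
  induction hn : cs.length using Nat.strong_induction_on generalizing cs l with
  | _ n ih =>
    match cs with
    | [] =>
        simp [req3Go, dblGo]; omega
    | [a] =>
        simp [req3Go, dblGo]; omega
    | a :: b :: rest =>
        have hlen : (a :: b :: rest).length = n := hn
        rw [req3Go, dblGo]
        by_cases hab : a = b
        · subst hab
          simp only [if_true]
          by_cases hm : a ∈ l
          · simp only [if_pos hm]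
            have hc : ¬ ((l.length : Int) = 2) := by omega
            rw [if_neg hc]
            have hadd : PySem.Set.add l a = l := by
              simp [PySem.Set.add, PySem.Set.contains, hm]
            rw [hadd, dblGo_cons_mem a rest l hm]
            exact ih rest.length (by simp at hlen; omega) rest l hl rfl
          · simp only [if_neg hm]
            have hadd : PySem.Set.add l a = l ++ [a] := by
              simp [PySem.Set.add, PySem.Set.contains, hm]
            rw [hadd]
            by_cases h1 : l.length = 1
            · have hc : ((l.length : Int) + 1) = 2 := by omega
              rw [if_pos hc]
              have hmono := dblGo_length_mono (a :: rest) (l ++ [a])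
              have h2 : (l ++ [a]).length = 2 := by simp [h1]
              have : 2 ≤ (dblGo (a :: rest) (l ++ [a])).length := by omega
              simp [this]
            · have h0 : l.length = 0 := by omega
              have hc : ¬ (((l.length : Int) + 1) = 2) := by omega
              rw [if_neg hc]
              rw [dblGo_cons_mem a rest (l ++ [a]) (by simp)]
              have := ih rest.length (by simp at hlen; omega) rest (l ++ [a])
                (by simp [h0]) rfl
              have hcast : ((l ++ [a]).length : Int) = (l.length : Int) + 1 := by simp
              rw [hcast] at this
              exact this
        · rw [if_neg hab, if_neg hab]
          exact ih (b :: rest).length (by simp at hlen ⊢; omega) (b :: rest) l hl rfl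

-- ===== VERDICT (by name: the statement is the Claim_ definition above) =====
theorem req3_spec : Claim_equal_req3 := by
  intro s _
  unfold Spec_req3 req3 req3_alt
  have := req3Go_eq s.toList [] (by simp)
  simpa [PySem.Set.empty] using this
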